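-- pv_equiv track=rewrite | github.com/Kiran-Karimi/ibm-coding-challenges | service_timeout_monitor.py | findTimedOutServices
-- ===== SOURCE A (Python) =====
-- def findTimedOutServices(timestamp, serviceId, threshold):
--     from collections import defaultdict
--
--     service_map = defaultdict(list)
--     for t, sid in zip(timestamp, serviceId):
--         service_map[sid].append(t)
--
--     timed_out = []
--     for sid, times in service_map.items():
--         times.sort()
--         for i in range(1, len(times)):
--             if times[i] - times[i - 1] > threshold:
--                 timed_out.append(sid)
--                 break
--
--     return sorted(timed_out)
-- ===== SOURCE B (Python) =====
-- def findTimedOutServices(timestamp, serviceId, threshold):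
--     pairs = list(zip(timestamp, serviceId))
--     result = []
--     for sid in sorted(set(s for _, s in pairs)):
--         ts = sorted(t for t, s in pairs if s == sid)
--         if any(b - a > threshold for a, b in zip(ts, ts[1:])):
--             result.append(sid)
--     return result
-- ===== Notes on version B (the rewrite author's own statement) =====
-- stated objective: simpler
-- what changed: Replaces the defaultdict grouping, the in-place per-group sort, the index loop with break, and the final sort by a single pass over the sorted distinct service ids, selecting each id with a per-id comprehension and an adjacent-pair gap test; the output is built already in sorted order so no final sort is needed.
import Mathlib
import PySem

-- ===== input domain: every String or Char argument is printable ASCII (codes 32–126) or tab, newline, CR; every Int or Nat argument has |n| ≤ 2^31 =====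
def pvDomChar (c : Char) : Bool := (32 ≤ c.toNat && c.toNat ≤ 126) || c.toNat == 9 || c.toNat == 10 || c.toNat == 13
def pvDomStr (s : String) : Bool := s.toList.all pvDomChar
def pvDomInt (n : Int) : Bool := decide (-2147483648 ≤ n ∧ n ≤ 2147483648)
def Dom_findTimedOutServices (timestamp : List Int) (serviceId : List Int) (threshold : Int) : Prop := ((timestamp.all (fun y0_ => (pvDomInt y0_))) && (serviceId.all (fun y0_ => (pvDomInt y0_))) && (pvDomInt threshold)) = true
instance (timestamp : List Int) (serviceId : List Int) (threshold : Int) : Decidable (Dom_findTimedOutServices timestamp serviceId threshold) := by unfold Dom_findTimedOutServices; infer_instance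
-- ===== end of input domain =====

-- B replaces A's dict grouping, per-group in-place sort, index loop with break and final sort
-- by one pass over the sorted distinct service ids with a per-id comprehension and an
-- adjacent-pair gap test (objective: simpler; not faster).

-- ===== PORT A =====
-- inner loop 'for i in range(1, len(times)): if times[i] - times[i-1] > threshold: append; break'
-- ported as a recursion over the range list returning whether the append happened;
-- the catch-all 'none' branch is unreachable (i ranges over valid indices only).
def aGapLoop (times : List Int) (threshold : Int) : List Int → Bool
  | [] => false
  | i :: rest =>
    match PySem.List.pyGet? times i, PySem.List.pyGet? times (i - 1) with
    | some a, some b => if a - b > threshold then true else aGapLoop times threshold rest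
    | _, _ => false

def findTimedOutServices (timestamp : List Int) (serviceId : List Int) (threshold : Int) : List Int :=
  let serviceMap := (List.zip timestamp serviceId).foldl
    (fun d p => d.modify p.2 [] (fun l => l ++ [p.1])) PySem.Dict.empty
  let timedOut := serviceMap.items.foldl
    (fun acc p =>
      let times := PySem.List.sorted p.2 (fun x => x) false
      if aGapLoop times threshold (PySem.List.pyRange 1 (times.length : Int) 1) then acc ++ [p.1]
      else acc) []
  PySem.List.sorted timedOut (fun x => x) false

-- ===== PORT B =====
def bGap (ts : List Int) (threshold : Int) : Bool :=
  (List.zip ts (ts.drop 1)).any (fun p => decide (p.2 - p.1 > threshold))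

def findTimedOutServices_alt (timestamp : List Int) (serviceId : List Int) (threshold : Int) : List Int :=
  let pairs := List.zip timestamp serviceId
  (PySem.List.sorted (PySem.Set.ofList (pairs.map (fun p => p.2))) (fun x => x) false).foldl
    (fun res sid =>
      let ts := PySem.List.sorted
        (pairs.filterMap (fun p => if p.2 = sid then some p.1 else none)) (fun x => x) false
      if bGap ts threshold then res ++ [sid] else res) []

-- ===== PRECONDITION & SPEC =====
def Spec_findTimedOutServices (timestamp : List Int) (serviceId : List Int) (threshold : Int) (out : List Int) : Prop := out = findTimedOutServices_alt timestamp serviceId threshold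
instance (timestamp : List Int) (serviceId : List Int) (threshold : Int) (out : List Int) : Decidable (Spec_findTimedOutServices timestamp serviceId threshold out) := by unfold Spec_findTimedOutServices; infer_instance

-- ===== CLAIM (what is proved, stated in full; the proofs are below) =====
def Claim_equal_findTimedOutServices : Prop := ∀ (timestamp : List Int) (serviceId : List Int) (threshold : Int), Dom_findTimedOutServices timestamp serviceId threshold → Spec_findTimedOutServices timestamp serviceId threshold (findTimedOutServices timestamp serviceId threshold)

-- ===== LEMMAS AND PROOFS =====

lemma bGap_short (l : List Int) (thr : Int) (h : l.length ≤ 1) : bGap l thr = false := by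
  match l, h with
  | [], _ => rfl
  | [a], _ => rfl

lemma bGap_cons_cons (x y : Int) (r : List Int) (thr : Int) :
    bGap (x :: y :: r) thr = (decide (y - x > thr) || bGap (y :: r) thr) := by
  simp [bGap]

-- A's break-loop over indices starting at i ≥ 1 equals B's adjacent-pair test on the suffix
lemma aGapLoop_eq_bGap_from (ts : List Int) (thr : Int) :
    ∀ d i : Nat, 1 ≤ i → ts.length - i = d →
      aGapLoop ts thr (PySem.List.pyRange (i : Int) (ts.length : Int) 1) = bGap (ts.drop (i - 1)) thr := by
  intro d
  induction d with
  | zero =>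
    intro i h1 hd
    have hr : PySem.List.pyRange (i : Int) (ts.length : Int) 1 = [] := by
      simp [PySem.List.pyRange]; omega
    rw [hr]
    have hlen : (ts.drop (i - 1)).length ≤ 1 := by simp; omega
    rw [bGap_short _ _ hlen]; rfl
  | succ d ih =>
    intro i h1 hd
    have hi : i < ts.length := by omega
    have hic : (i : Int) < (ts.length : Int) := by exact_mod_cast hi
    rw [PySem.List.pyRange_one_cons hic]
    have hg1 : PySem.List.pyGet? ts (i : Int) = some ts[i] := PySem.List.pyGet?_ofNat ts i hi
    have hi1 : i - 1 < ts.length := by omega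
    have hg2 : PySem.List.pyGet? ts ((i : Int) - 1) = some ts[i-1] := by
      have : (i : Int) - 1 = ((i - 1 : Nat) : Int) := by omega
      rw [this]; exact PySem.List.pyGet?_ofNat ts (i-1) hi1
    have hrec : ((i : Int) + 1) = ((i + 1 : Nat) : Int) := by push_cast; ring
    have ihy := ih (i + 1) (by omega) (by omega)
    rw [show (i + 1 : Nat) - 1 = i from by omega] at ihy
    have hdrop1 : ts.drop (i - 1) = ts[i-1] :: ts.drop i := by
      have := List.drop_eq_getElem_cons hi1
      rw [show i - 1 + 1 = i from by omega] at this; exact this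
    have hdrop2 : ts.drop i = ts[i] :: ts.drop (i + 1) := List.drop_eq_getElem_cons hi
    rw [hdrop1, hdrop2]
    rw [show ts[i-1] :: ts[i] :: ts.drop (i+1) = ts[i-1] :: (ts.drop i) from by rw [hdrop2]]
    rw [hdrop2, bGap_cons_cons]
    simp only [aGapLoop, hg1, hg2, hrec]
    rw [← hdrop2, ← ihy]
    by_cases hc : ts[i] - ts[i-1] > thr <;> simp [hc]

lemma aGapLoop_eq_bGap (ts : List Int) (thr : Int) :
    aGapLoop ts thr (PySem.List.pyRange 1 (ts.length : Int) 1) = bGap ts thr := by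
  have := aGapLoop_eq_bGap_from ts thr (ts.length - 1) 1 le_rfl rfl
  simpa using this

-- the times collected per sid by A's dict equal B's comprehension
lemma times_filter_eq (pairs : List (Int × Int)) (s : Int) :
    ((pairs.map Prod.swap).filter (fun q => q.1 == s)).map (fun q => q.2)
      = pairs.filterMap (fun p => if p.2 = s then some p.1 else none) := by
  induction pairs with
  | nil => rfl
  | cons p rest ih =>
    cases p with
    | mk t sid => by_cases h : sid = s <;> simp [h, ih, Prod.swap]

theorem findTimedOutServices_spec_aux (timestamp serviceId : List Int) (threshold : Int) :
    findTimedOutServices timestamp serviceId threshold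
      = findTimedOutServices_alt timestamp serviceId threshold := by
  unfold findTimedOutServices findTimedOutServices_alt
  dsimp only
  set pairs := List.zip timestamp serviceId with hpairs
  set m := pairs.foldl (fun d p => d.modify p.2 [] (fun l => l ++ [p.1])) PySem.Dict.empty with hm
  set Q : Int → Bool := fun k => bGap (PySem.List.sorted
      (pairs.filterMap (fun p => if p.2 = k then some p.1 else none)) (fun x => x) false) threshold with hQ
  have hkeys : m.keys = PySem.Set.ofList (pairs.map (fun p => p.2)) := by
    rw [hm]
    rw [PySem.Dict.keys_foldl_modify_key pairs (fun p => p.2) [] (fun _ p => (fun l => l ++ [p.1])) PySem.Dict.empty]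
    simp [PySem.Dict.keys_empty, PySem.Set.ofList_eq_foldl, PySem.Set.update]
  have hnd : m.keys.Nodup := by
    rw [hm]
    exact PySem.Dict.nodup_keys_foldl_modify_key pairs (fun p => p.2) [] _ _ (by simp)
  have hgetD : ∀ s, m.getD s [] = pairs.filterMap (fun p => if p.2 = s then some p.1 else none) := by
    intro s
    rw [hm]
    have : pairs.foldl (fun d p => d.modify p.2 [] (fun l => l ++ [p.1])) PySem.Dict.empty
        = (pairs.map Prod.swap).foldl (fun d q => d.modify q.1 [] (fun l => l ++ [q.2])) PySem.Dict.empty := by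
      rw [List.foldl_map]
      rfl
    rw [this, PySem.Dict.getD_foldl_modify_append, PySem.Dict.getD_empty]
    simp [times_filter_eq]
  rw [PySem.List.foldl_append_if
    (fun p : Int × List Int => aGapLoop (PySem.List.sorted p.2 (fun x => x) false) threshold
      (PySem.List.pyRange 1 ((PySem.List.sorted p.2 (fun x => x) false).length : Int) 1))
    (fun p => p.1) m.items []]
  rw [PySem.List.foldl_append_if_eq_filter Q _ []]
  simp only [List.nil_append]
  rw [PySem.Dict.items_eq_map_keys m hnd [], List.filter_map, List.map_map]
  have hcomp : ∀ k : Int,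
      ((fun p : Int × List Int => aGapLoop (PySem.List.sorted p.2 (fun x => x) false) threshold
        (PySem.List.pyRange 1 ((PySem.List.sorted p.2 (fun x => x) false).length : Int) 1))
       ∘ (fun k => (k, m.getD k []))) k = Q k := by
    intro k
    simp only [Function.comp]
    rw [aGapLoop_eq_bGap, hgetD k]
  have hfun : ((fun p : Int × List Int => aGapLoop (PySem.List.sorted p.2 (fun x => x) false) threshold
        (PySem.List.pyRange 1 ((PySem.List.sorted p.2 (fun x => x) false).length : Int) 1))
       ∘ (fun k => (k, m.getD k []))) = Q := funext hcomp
  rw [hfun]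
  have hmapid : ((fun p : Int × List Int => p.1) ∘ (fun k => (k, m.getD k []))) = id := rfl
  rw [hmapid, List.map_id, hkeys]
  apply PySem.List.sorted_eq_of_perm_of_pairwise_lt
  · exact ((PySem.List.sorted_perm (PySem.Set.ofList (pairs.map (fun p => p.2))) (fun x => x) false)).filter Q
  · exact (PySem.List.sorted_ofList_pairwise_lt (pairs.map (fun p => p.2))).filter Q

-- ===== VERDICT (by name: the statement is the Claim_ definition above) =====
theorem findTimedOutServices_spec : Claim_equal_findTimedOutServices := by
  intro timestamp serviceId threshold _
  exact findTimedOutServices_spec_aux timestamp serviceId threshold
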